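-- pv_equiv track=rewrite | github.com/mikwit/adventofcode | lwhite17/2020/days/Day1.py | balance_expense_report_2
-- ===== SOURCE A (Python) =====
-- def balance_expense_report_2(report):
--     done = False
--     product = 1
--
--     # get first number
--     for ind1, num1 in enumerate(report):
--         if not isinstance(num1, int):
--             num1 = int(num1)
--         # get second number
--         for ind2, num2 in enumerate(report[ind1+1:]):
--             if not isinstance(num2, int):
--                 num2 = int(num2)
--             # check sum
--             if num1 + num2 == 2020:
--                 done = True
--                 # print product
--                 product = num1 * num2
--                 break
--         if done:
--             break
--     return product
-- ===== SOURCE B (Python) =====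
-- def balance_expense_report_2(report):
--     # one pass with suffix value-counts: O(n) instead of A's nested scan
--     counts = {}
--     for v in report:
--         counts[v] = counts.get(v, 0) + 1
--     for v in report:
--         counts[v] -= 1          # counts now describes the strict suffix after v
--         if counts.get(2020 - v, 0) > 0:
--             return v * (2020 - v)
--     return 1
-- ===== Notes on version B (the rewrite author's own statement) =====
-- stated objective: faster
-- what changed: Replaces the nested index scan with a hash value-counter built once and decremented in a single pass, so the inner suffix scan disappears.
import Mathlib
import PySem

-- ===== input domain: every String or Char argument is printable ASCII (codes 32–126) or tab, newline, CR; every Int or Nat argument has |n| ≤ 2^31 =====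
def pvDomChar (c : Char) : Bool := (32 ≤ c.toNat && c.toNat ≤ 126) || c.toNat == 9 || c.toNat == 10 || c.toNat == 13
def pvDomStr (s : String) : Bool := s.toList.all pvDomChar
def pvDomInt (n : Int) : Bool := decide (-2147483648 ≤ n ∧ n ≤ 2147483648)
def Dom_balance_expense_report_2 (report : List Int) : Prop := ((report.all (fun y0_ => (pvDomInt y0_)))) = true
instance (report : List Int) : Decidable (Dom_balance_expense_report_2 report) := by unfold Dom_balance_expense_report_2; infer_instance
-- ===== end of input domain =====

-- B replaces A's nested index scan by a value-counter decremented in one pass (objective: faster, O(n) vs O(n^2)).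

-- ===== PORT A =====
-- inner 'for ind2, num2 in enumerate(report[ind1+1:])' loop: first pair summing to 2020
def pyInner (num1 : Int) : List Int → Option Int
  | [] => none
  | num2 :: rest => if num1 + num2 = 2020 then some (num1 * num2) else pyInner num1 rest

-- outer 'for ind1, num1 in enumerate(report)' loop; report[ind1+1:] is the tail at ind1
def pyOuter : List Int → Int
  | [] => 1
  | num1 :: rest =>
    match pyInner num1 rest with
    | some product => product
    | none => pyOuter rest

def balance_expense_report_2 (report : List Int) : Int := pyOuter report

-- ===== PORT B =====
-- first loop of Source B: build the value counter
def altCounter (report : List Int) : PySem.Dict Int Int :=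
  report.foldl (fun d v => d.insert v (d.getD v 0 + 1)) PySem.Dict.empty

-- second loop of Source B: decrement the current element, then check the complement
def altLoop : PySem.Dict Int Int → List Int → Int
  | _, [] => 1
  | counts, v :: rest =>
    let counts' := counts.insert v (counts.getD v 0 - 1)
    if counts'.getD (2020 - v) 0 > 0 then v * (2020 - v) else altLoop counts' rest

def balance_expense_report_2_alt (report : List Int) : Int :=
  altLoop (altCounter report) report

-- ===== PRECONDITION & SPEC =====
def Spec_balance_expense_report_2 (report : List Int) (out : Int) : Prop := out = balance_expense_report_2_alt report
instance (report : List Int) (out : Int) : Decidable (Spec_balance_expense_report_2 report out) := by unfold Spec_balance_expense_report_2; infer_instance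

-- ===== CLAIM (what is proved, stated in full; the proofs are below) =====
def Claim_equal_balance_expense_report_2 : Prop := ∀ (report : List Int), Dom_balance_expense_report_2 report → Spec_balance_expense_report_2 report (balance_expense_report_2 report)

-- ===== LEMMAS AND PROOFS =====

-- the inner scan finds the complement iff it is in the suffix, and the product is determined by num1
theorem pyInner_eq (num1 : Int) (l : List Int) :
    pyInner num1 l = if (2020 - num1) ∈ l then some (num1 * (2020 - num1)) else none := by
  induction l with
  | nil => simp [pyInner]
  | cons x t ih =>
    by_cases h : num1 + x = 2020
    · have hx : x = 2020 - num1 := by omega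
      simp [pyInner, hx]
    · have hx : (2020 - num1) ≠ x := by omega
      simp [pyInner, h, ih, hx, List.mem_cons]

-- the folded counter counts occurrences
theorem counter_getD (l : List Int) (d : PySem.Dict Int Int) (c : Int) :
    (l.foldl (fun d v => d.insert v (d.getD v 0 + 1)) d).getD c 0
      = d.getD c 0 + (l.count c : Int) := by
  induction l generalizing d with
  | nil => simp
  | cons v t ih =>
    simp only [List.foldl_cons, ih, List.count_cons, PySem.Dict.getD_insert]
    by_cases hc : c = v
    · simp [hc]; push_cast; ring
    · simp [hc, Ne.symm hc]

-- main invariant: whenever the counter describes the remaining list, the two loops agree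
theorem altLoop_eq (l : List Int) (d : PySem.Dict Int Int)
    (hd : ∀ c, d.getD c 0 = (l.count c : Int)) : pyOuter l = altLoop d l := by
  induction l generalizing d with
  | nil => simp [pyOuter, altLoop]
  | cons v rest ih =>
    have hd' : ∀ c, (d.insert v (d.getD v 0 - 1)).getD c 0 = (rest.count c : Int) := by
      intro c
      rw [PySem.Dict.getD_insert]
      by_cases hc : c = v
      · subst hc; rw [if_pos rfl, hd]; simp
      · rw [if_neg hc, hd]
        simp [Ne.symm hc]
    rw [pyOuter, altLoop, pyInner_eq]
    by_cases hm : (2020 - v) ∈ rest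
    · have : (d.insert v (d.getD v 0 - 1)).getD (2020 - v) 0 > 0 := by
        rw [hd']
        exact_mod_cast List.count_pos_iff.mpr hm
      simp [hm, this]
    · have hcond : ¬ ((d.insert v (d.getD v 0 - 1)).getD (2020 - v) 0 > 0) := by
        rw [hd']
        simp [List.count_eq_zero_of_not_mem hm]
      simp only [if_neg hm, if_neg hcond]
      exact ih _ hd'

-- ===== VERDICT (by name: the statement is the Claim_ definition above) =====
theorem balance_expense_report_2_spec : Claim_equal_balance_expense_report_2 := by
  intro report _
  unfold Spec_balance_expense_report_2 balance_expense_report_2 balance_expense_report_2_alt altCounter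
  exact altLoop_eq report _ (fun c => by rw [counter_getD]; simp)
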